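-- pv_equiv track=rewrite | github.com/koojun99/codetree-TILs | 240130/xor 결과 최대 만들기/max-of-xor.py | max_xor_combination
-- ===== SOURCE A (Python) =====
-- def max_xor_combination(arr, m):
--     n = len(arr)
--     max_xor = 0
--
--     # 모든 가능한 조합을 생성하고 XOR 연산 수행
--     for i in range(1 << n):
--         if bin(i).count('1') == m:  # m개의 숫자를 선택하는 경우
--             selected_numbers = [arr[j] for j in range(n) if (i & (1 << j)) != 0]
--             current_xor = selected_numbers[0]
--             for num in selected_numbers[1:]:
--                 current_xor ^= num
--             max_xor = max(max_xor, current_xor)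
--
--     return max_xor
-- ===== SOURCE B (Python) =====
-- def max_xor_combination(arr, m):
--     n = len(arr)
--     max_xor = 0
--
--     def helper(i, chosen):
--         nonlocal max_xor
--         if i == n:
--             if len(chosen) == m:
--                 current = chosen[0]
--                 for x in chosen[1:]:
--                     current ^= x
--                 max_xor = max(max_xor, current)
--             return
--         helper(i + 1, chosen)
--         helper(i + 1, chosen + [arr[i]])
--
--     helper(0, [])
--     return max_xor
-- ===== Notes on version B (the rewrite author's own statement) =====
-- stated objective: alternative
-- what changed: Replaced A's linear sweep over all 2^n bitmasks with popcount filtering by recursive skip/include backtracking over indices that builds each chosen subset explicitly.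
import Mathlib
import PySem

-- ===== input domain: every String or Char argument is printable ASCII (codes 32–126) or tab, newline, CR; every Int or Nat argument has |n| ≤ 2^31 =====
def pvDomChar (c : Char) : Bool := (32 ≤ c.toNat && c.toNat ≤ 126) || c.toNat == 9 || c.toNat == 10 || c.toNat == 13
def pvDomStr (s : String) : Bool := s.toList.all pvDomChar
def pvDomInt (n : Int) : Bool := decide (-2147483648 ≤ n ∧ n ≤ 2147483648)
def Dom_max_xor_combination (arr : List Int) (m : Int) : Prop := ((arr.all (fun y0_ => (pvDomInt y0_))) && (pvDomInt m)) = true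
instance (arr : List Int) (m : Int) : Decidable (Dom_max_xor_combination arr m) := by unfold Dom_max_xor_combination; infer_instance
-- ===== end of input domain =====

-- B replaces A's bitmask sweep over range(1 << n) by recursive skip/include backtracking over
-- indices (same exponential cost; objective: alternative decomposition).

-- ===== PORT A =====
-- bin(i).count('1'): number of 1-digits in the binary representation of i (exact for i ≥ 0)
def pvPopcount (n : Nat) : Nat :=
  if h : n = 0 then 0 else n % 2 + pvPopcount (n / 2)
decreasing_by exact Nat.div_lt_self (Nat.pos_of_ne_zero h) one_lt_two

-- the comprehension [arr[j] for j in range(n) if (i & (1 << j)) != 0]; j < n, so arr[j] = arr.getD j 0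
def pvSelectedA (arr : List Int) (i : Nat) : List Int :=
  ((List.range arr.length).filter (fun j => i &&& (1 <<< j) != 0)).map (fun j => arr.getD j 0)

def max_xor_combination (arr : List Int) (m : Int) : Int :=
  let n := arr.length
  (List.range (2 ^ n)).foldl
    (fun max_xor i =>
      if (pvPopcount i : Int) = m then
        let selected := pvSelectedA arr i
        -- selected[0]: Pre_ guarantees selected ≠ [] here (m ≠ 0), so headD's default is never used
        let current := (selected.drop 1).foldl PySem.Int.bxor (selected.headD 0)
        max max_xor current
      else max_xor) 0

-- ===== PORT B =====
-- helper(i, chosen): i == n checks length and updates the maximum; otherwise skip arr[i], then take it.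
-- Python recursion is guarded by i < n (helper is only ever called with i ≤ n).
def pvHelperB (arr : List Int) (m : Int) (i : Nat) (chosen : List Int) (max_xor : Int) : Int :=
  if h : i < arr.length then  -- Python: if i == n (helper is only reached with i ≤ n)
    let mx := pvHelperB arr m (i + 1) chosen max_xor
    pvHelperB arr m (i + 1) (chosen ++ [arr.getD i 0]) mx
  else
    if (chosen.length : Int) = m then
      max max_xor ((chosen.drop 1).foldl PySem.Int.bxor (chosen.headD 0))
    else max_xor
termination_by arr.length - i
decreasing_by all_goals omega

def max_xor_combination_alt (arr : List Int) (m : Int) : Int :=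
  pvHelperB arr m 0 [] 0

-- ===== PRECONDITION & SPEC =====
-- Pre_ excludes m = 0 only: there both Pythons evaluate selected[0] / chosen[0] on the empty
-- selection (the empty subset has popcount 0) and raise IndexError.
def Pre_max_xor_combination (arr : List Int) (m : Int) : Prop := m ≠ 0
instance (arr : List Int) (m : Int) : Decidable (Pre_max_xor_combination arr m) := by
  unfold Pre_max_xor_combination; infer_instance

def pvWitness_max_xor_combination : List Int × Int := ([3, 5, 6], 2)

def Spec_max_xor_combination (arr : List Int) (m : Int) (out : Int) : Prop := out = max_xor_combination_alt arr m
instance (arr : List Int) (m : Int) (out : Int) : Decidable (Spec_max_xor_combination arr m out) := by unfold Spec_max_xor_combination; infer_instance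

-- ===== CLAIM (what is proved, stated in full; the proofs are below) =====
def Claim_equal_max_xor_combination : Prop := ∀ (arr : List Int) (m : Int), Dom_max_xor_combination arr m → Pre_max_xor_combination arr m → Spec_max_xor_combination arr m (max_xor_combination arr m)

-- ===== LEMMAS AND PROOFS =====

-- the common "candidate subset" step: update the running maximum with subset s if it has size m
def pvStep (m : Int) (mx : Int) (s : List Int) : Int :=
  if (s.length : Int) = m then
    max mx ((s.drop 1).foldl PySem.Int.bxor (s.headD 0))
  else mx

theorem pvPopcount_zero : pvPopcount 0 = 0 := by
  rw [pvPopcount]; simp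

theorem pvPopcount_step (i : Nat) : pvPopcount i = i % 2 + pvPopcount (i / 2) := by
  by_cases h : i = 0
  · subst h; simp [pvPopcount_zero]
  · rw [pvPopcount]; simp [h]

theorem pvRange_double (k : Nat) :
    List.range (2 * k) = (List.range k).flatMap (fun j => [2 * j, 2 * j + 1]) := by
  induction k with
  | zero => rfl
  | succ k ih =>
    have h2 : 2 * (k + 1) = (2 * k + 1) + 1 := by ring
    rw [h2, List.range_succ, List.range_succ, List.range_succ, List.flatMap_append, ← ih]
    simp

theorem pvCond_succ (i j : Nat) :
    (i &&& (1 <<< (j + 1)) != 0) = ((i / 2) &&& (1 <<< j) != 0) := by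
  rw [Nat.one_shiftLeft, Nat.one_shiftLeft, Nat.and_two_pow, Nat.and_two_pow,
    ← Nat.testBit_succ]
  have e1 : (((2 : Nat) ^ (j + 1)) != 0) = true := bne_iff_ne.mpr (Nat.two_pow_pos _).ne'
  have e2 : (((2 : Nat) ^ j) != 0) = true := bne_iff_ne.mpr (Nat.two_pow_pos _).ne'
  cases i.testBit (j + 1)
  · simp
  · simp only [Bool.toNat_true, one_mul, e1, e2]

theorem pvSelectedA_even (a : Int) (t : List Int) (j : Nat) :
    pvSelectedA (a :: t) (2 * j) = pvSelectedA t j := by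
  unfold pvSelectedA
  have h0 : ((2 * j) &&& (1 <<< 0) != 0) = false := by
    rw [Nat.one_shiftLeft, Nat.and_two_pow, Nat.testBit_zero]; simp [Nat.mul_mod_right]
  have hf : ∀ x ∈ List.range t.length,
      ((fun jj => (2 * j) &&& (1 <<< jj) != 0) ∘ Nat.succ) x
        = (fun jj => j &&& (1 <<< jj) != 0) x := by
    intro x _
    simp only [Function.comp, Nat.succ_eq_add_one, pvCond_succ, Nat.mul_div_cancel_left j
      (by omega : 0 < 2)]
  rw [List.length_cons, List.range_succ_eq_map, List.filter_cons, List.filter_map,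
    List.filter_congr hf]
  simp [List.map_map, Function.comp]

theorem pvSelectedA_odd (a : Int) (t : List Int) (j : Nat) :
    pvSelectedA (a :: t) (2 * j + 1) = a :: pvSelectedA t j := by
  unfold pvSelectedA
  have h0 : ((2 * j + 1) &&& (1 <<< 0) != 0) = true := by
    rw [Nat.one_shiftLeft, Nat.and_two_pow, Nat.testBit_zero]
    simp [Nat.mul_add_mod 2 j 1]
  have hdiv : (2 * j + 1) / 2 = j := by omega
  have hf : ∀ x ∈ List.range t.length,
      ((fun jj => (2 * j + 1) &&& (1 <<< jj) != 0) ∘ Nat.succ) x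
        = (fun jj => j &&& (1 <<< jj) != 0) x := by
    intro x _
    simp only [Function.comp, Nat.succ_eq_add_one, pvCond_succ, hdiv]
  rw [List.length_cons, List.range_succ_eq_map, List.filter_cons, List.filter_map,
    List.filter_congr hf]
  simp [List.map_map, Function.comp]

theorem pvMapRange_sublists (arr : List Int) :
    (List.range (2 ^ arr.length)).map (pvSelectedA arr) = arr.sublists := by
  induction arr with
  | nil => simp [pvSelectedA]
  | cons a t ih =>
    have hp : (2 : Nat) ^ (a :: t).length = 2 * 2 ^ t.length := by
      rw [List.length_cons, pow_succ]; ring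
    rw [hp, pvRange_double, List.map_flatMap, List.sublists_cons, ← ih]
    show _ = ((List.range (2 ^ t.length)).map (pvSelectedA t)).flatMap (fun x => [x, a :: x])
    rw [List.flatMap_map]
    apply List.flatMap_congr
    intro j _
    simp [pvSelectedA_even, pvSelectedA_odd]

theorem pvPopcount_len (n : Nat) :
    ∀ i, i < 2 ^ n →
      pvPopcount i = ((List.range n).filter (fun j => i &&& (1 <<< j) != 0)).length := by
  induction n with
  | zero =>
    intro i hi
    interval_cases i
    simp [pvPopcount_zero]
  | succ n ih =>
    intro i hi
    have hdiv : i / 2 < 2 ^ n := by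
      have := Nat.div_le_div_right (c := 2) (Nat.le_of_lt_succ (Nat.lt_succ_of_lt hi))
      omega
    rw [pvPopcount_step, List.range_succ_eq_map, List.filter_cons, List.filter_map,
      ih (i / 2) hdiv]
    have h0 : (i &&& (1 <<< 0) != 0) = decide (i % 2 = 1) := by
      rw [Nat.one_shiftLeft, Nat.and_two_pow, Nat.testBit_zero]
      cases h : decide (i % 2 = 1) <;> simp_all
    rw [h0]
    have hfe : (List.range n).filter ((fun j => i &&& (1 <<< j) != 0) ∘ Nat.succ)
        = (List.range n).filter (fun j => (i / 2) &&& (1 <<< j) != 0) := by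
      apply List.filter_congr; intro x _; simp [Function.comp, pvCond_succ]
    rw [hfe]
    by_cases hp : i % 2 = 1
    · simp [hp]; omega
    · have h2 : i % 2 = 0 := by omega
      simp [h2]

theorem pvFoldl_congr_mem {α β : Type} (l : List α) (f g : β → α → β) (b : β)
    (h : ∀ x ∈ l, ∀ acc, f acc x = g acc x) : l.foldl f b = l.foldl g b := by
  induction l generalizing b with
  | nil => rfl
  | cons x xs ih =>
    simp only [List.foldl_cons]
    rw [h x (by simp)]
    exact ih _ (fun y hy acc => h y (by simp [hy]) acc)

theorem pvFoldl_perm {α β : Type} {f : β → α → β}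
    (h : ∀ b x y, f (f b x) y = f (f b y) x) {l₁ l₂ : List α} (p : l₁.Perm l₂) :
    ∀ b, l₁.foldl f b = l₂.foldl f b := by
  induction p with
  | nil => intro b; rfl
  | cons x _ ih => intro b; simp only [List.foldl_cons]; exact ih _
  | swap x y l => intro b; simp only [List.foldl_cons]; rw [h]
  | trans _ _ ih1 ih2 => intro b; rw [ih1, ih2]

theorem pvStep_comm (m : Int) : ∀ b x y, pvStep m (pvStep m b x) y = pvStep m (pvStep m b y) x := by
  intro b x y
  unfold pvStep
  split_ifs <;> first | rfl | exact max_right_comm _ _ _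

theorem pvHelperB_eq (arr : List Int) (m : Int) :
    ∀ k i chosen mx, arr.length - i ≤ k →
      pvHelperB arr m i chosen mx
        = (((arr.drop i).sublists').map (chosen ++ ·)).foldl (pvStep m) mx := by
  intro k
  induction k with
  | zero =>
    intro i chosen mx hk
    have h : ¬ i < arr.length := by omega
    rw [pvHelperB]
    simp only [h, dite_false]
    rw [List.drop_eq_nil_of_le (show arr.length ≤ i by omega), List.sublists'_nil]
    simp [pvStep]
  | succ k ih =>
    intro i chosen mx hk
    by_cases h : i < arr.length
    · rw [pvHelperB]
      simp only [h, dite_true]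
      rw [ih (i + 1) chosen mx (by omega), ih (i + 1) (chosen ++ [arr.getD i 0]) _ (by omega)]
      have hdrop : arr.drop i = arr[i] :: arr.drop (i + 1) := (List.getElem_cons_drop h).symm
      rw [hdrop, List.sublists'_cons, List.map_append, List.foldl_append]
      congr 1
      rw [List.map_map]
      apply List.map_congr_left
      intro s _
      simp [Function.comp, List.getD_eq_getElem?_getD, List.getElem?_eq_getElem h,
        List.append_assoc]
    · rw [pvHelperB]
      simp only [h, dite_false]
      rw [List.drop_eq_nil_of_le (show arr.length ≤ i by omega), List.sublists'_nil]
      simp [pvStep]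

theorem pvA_eq_fold (arr : List Int) (m : Int) :
    max_xor_combination arr m = (arr.sublists).foldl (pvStep m) 0 := by
  unfold max_xor_combination
  rw [← pvMapRange_sublists, List.foldl_map]
  apply pvFoldl_congr_mem
  intro i hi acc
  have hlt : i < 2 ^ arr.length := List.mem_range.mp hi
  have hlen : (pvSelectedA arr i).length
      = ((List.range arr.length).filter (fun j => i &&& (1 <<< j) != 0)).length := by
    unfold pvSelectedA; rw [List.length_map]
  unfold pvStep
  rw [hlen, ← pvPopcount_len arr.length i hlt]

theorem pvB_eq_fold (arr : List Int) (m : Int) :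
    max_xor_combination_alt arr m = (arr.sublists').foldl (pvStep m) 0 := by
  unfold max_xor_combination_alt
  rw [pvHelperB_eq arr m arr.length 0 [] 0 (by omega)]
  simp

-- ===== VERDICT (by name: the statement is the Claim_ definition above) =====
theorem max_xor_combination_spec : Claim_equal_max_xor_combination := by
  intro arr m _ _
  unfold Spec_max_xor_combination
  rw [pvA_eq_fold, pvB_eq_fold]
  exact pvFoldl_perm (pvStep_comm m) (List.sublists_perm_sublists' arr) 0
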